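-- pv_equiv track=rewrite | github.com/CurcudelTeodor/Python_Laboratoare | Lab2/ex4.py | compose
-- ===== SOURCE A (Python) =====
-- def compose(notes, moves, start_position):
--     song = []
--     current_position = start_position
--     song.append(notes[current_position])
--
--     for move in moves:
--         # Calculate the new position after the move, considering circular indexing
--         current_position = (current_position + move) % len(notes)
--         song.append(notes[current_position])
--
--     return song
-- ===== SOURCE B (Python) =====
-- def compose(notes, moves, start_position):
--     # Back-to-front construction: take the total of all moves first, then walk
--     # the moves in REVERSE order, emitting the last note first while peeling the
--     # moves off the running total; finally emit the raw start note and reverse.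
--     n = len(notes)
--     total = sum(moves)
--     song = []
--     for move in reversed(moves):
--         song.append(notes[(start_position + total) % n])
--         total -= move
--     song.append(notes[start_position])
--     song.reverse()
--     return song
-- ===== Notes on version B (the rewrite author's own statement) =====
-- stated objective: alternative
-- what changed: B builds the song back-to-front: it sums all moves first, then traverses the moves in reverse order emitting the last note first while subtracting each move from the running total, appends the raw start note last and reverses, instead of A's forward loop threading a modded current position.
import Mathlib
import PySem

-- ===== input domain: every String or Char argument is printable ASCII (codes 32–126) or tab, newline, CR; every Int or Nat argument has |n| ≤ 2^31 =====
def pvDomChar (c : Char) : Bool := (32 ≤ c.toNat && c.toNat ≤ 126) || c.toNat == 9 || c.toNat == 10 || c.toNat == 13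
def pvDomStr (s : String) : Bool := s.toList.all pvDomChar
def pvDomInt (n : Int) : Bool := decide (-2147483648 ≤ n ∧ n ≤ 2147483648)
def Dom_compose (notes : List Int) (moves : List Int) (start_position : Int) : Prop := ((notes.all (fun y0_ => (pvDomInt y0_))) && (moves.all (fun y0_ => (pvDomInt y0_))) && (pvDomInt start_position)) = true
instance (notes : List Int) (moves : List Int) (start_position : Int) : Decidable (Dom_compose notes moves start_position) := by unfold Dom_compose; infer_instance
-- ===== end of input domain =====

-- B builds the song back-to-front (sum all moves, walk the moves reversed emitting the last
-- note first while peeling moves off the total, then reverse); A loops forward threading a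
-- modded current position. Same return value on Pre_.

-- ===== PORT A =====
def composeStepA (notes : List Int) (st : Int × List Int) (move : Int) : Int × List Int :=
  let p := PySem.Int.mod (st.1 + move) (notes.length : Int)
  (p, st.2 ++ [PySem.List.pyGetD notes p 0])

def compose (notes : List Int) (moves : List Int) (start_position : Int) : List Int :=
  (moves.foldl (composeStepA notes) (start_position, [PySem.List.pyGetD notes start_position 0])).2

-- ===== PORT B =====
def composeStepB (notes : List Int) (sp : Int) (st : Int × List Int) (move : Int) : Int × List Int :=
  (st.1 - move,
   st.2 ++ [PySem.List.pyGetD notes (PySem.Int.mod (sp + st.1) (notes.length : Int)) 0])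

def compose_alt (notes : List Int) (moves : List Int) (start_position : Int) : List Int :=
  let total : Int := moves.foldl (· + ·) 0
  let st := moves.reverse.foldl (composeStepB notes start_position) (total, [])
  (st.2 ++ [PySem.List.pyGetD notes start_position 0]).reverse

-- ===== PRECONDITION & SPEC =====
-- A raises IndexError when notes is empty or start_position is outside Python's index range.
def Pre_compose (notes : List Int) (moves : List Int) (start_position : Int) : Prop :=
  notes ≠ [] ∧ PySem.Raise.InRange notes.length start_position
instance (notes : List Int) (moves : List Int) (start_position : Int) : Decidable (Pre_compose notes moves start_position) := by unfold Pre_compose; infer_instance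
def pvWitness_compose : List Int × List Int × Int := ([1, 2, 3], ([2, -1, 4], 1))

def Spec_compose (notes : List Int) (moves : List Int) (start_position : Int) (out : List Int) : Prop := out = compose_alt notes moves start_position
instance (notes : List Int) (moves : List Int) (start_position : Int) (out : List Int) : Decidable (Spec_compose notes moves start_position out) := by unfold Spec_compose; infer_instance

-- ===== CLAIM (what is proved, stated in full; the proofs are below) =====
def Claim_equal_compose : Prop := ∀ (notes : List Int) (moves : List Int) (start_position : Int), Dom_compose notes moves start_position → Pre_compose notes moves start_position → Spec_compose notes moves start_position (compose notes moves start_position)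

-- ===== LEMMAS AND PROOFS =====

-- running prefix sums S_1, …, S_m of a move list, starting from acc
def pvPsums (acc : Int) : List Int → List Int
  | [] => []
  | m :: ms => (acc + m) :: pvPsums (acc + m) ms

lemma pvMod_zero_right (a : Int) : PySem.Int.mod a 0 = a := by
  simp [PySem.Int.mod]

lemma pvMod_congr_add (n a b m : Int) (hn : 0 ≤ n)
    (h : PySem.Int.mod a n = PySem.Int.mod b n) :
    PySem.Int.mod (a + m) n = PySem.Int.mod (b + m) n := by
  rcases lt_or_eq_of_le hn with hpos | hz
  · simp only [PySem.Int.mod_eq_emod_of_pos hpos] at h ⊢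
    rw [Int.add_emod a m, Int.add_emod b m, h]
  · subst hz
    simpa [pvMod_zero_right] using congrArg (· + m) (by simpa [pvMod_zero_right] using h)

lemma pvMod_idem (n a : Int) (hn : 0 ≤ n) :
    PySem.Int.mod (PySem.Int.mod a n) n = PySem.Int.mod a n := by
  rcases lt_or_eq_of_le hn with hpos | hz
  · rw [PySem.Int.mod_eq_emod_of_pos hpos, PySem.Int.mod_eq_emod_of_pos hpos,
      Int.emod_emod_of_dvd a dvd_rfl]
  · subst hz; simp [pvMod_zero_right]

-- A's forward fold produces `song ++` the notes at the (modded) prefix-sum positions.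
lemma pvCompose_key (notes : List Int) (sp : Int) :
    ∀ (moves : List Int) (pos acc : Int) (song : List Int),
      PySem.Int.mod pos (notes.length : Int) = PySem.Int.mod (sp + acc) (notes.length : Int) →
      (moves.foldl (composeStepA notes) (pos, song)).2
        = song ++ (pvPsums acc moves).map
            (fun s => PySem.List.pyGetD notes (PySem.Int.mod (sp + s) (notes.length : Int)) 0) := by
  intro moves
  induction moves with
  | nil => intro pos acc song _; simp [pvPsums]
  | cons m ms ih =>
    intro pos acc song h
    have hn : (0 : Int) ≤ (notes.length : Int) := by positivity
    have hcong : PySem.Int.mod (pos + m) (notes.length : Int)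
        = PySem.Int.mod (sp + (acc + m)) (notes.length : Int) := by
      have := pvMod_congr_add (notes.length : Int) pos (sp + acc) m hn h
      rwa [add_assoc] at this
    simp only [List.foldl_cons, composeStepA]
    rw [ih (PySem.Int.mod (pos + m) (notes.length : Int)) (acc + m) _
        (by rw [pvMod_idem _ _ hn, hcong])]
    simp [pvPsums, hcong]

-- B's reverse fold: starting the total at acc + sum ms, the fold ends at total = acc and emits
-- the prefix-sum notes in reverse order.
lemma pvFoldl_add : ∀ (ms : List Int) (a : Int), ms.foldl (· + ·) a = a + ms.foldl (· + ·) 0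
  | [], a => by simp
  | m :: ms, a => by
    simp only [List.foldl_cons, pvFoldl_add ms (a + m), pvFoldl_add ms (0 + m)]
    ring

lemma pvComposeB_key (notes : List Int) (sp : Int) :
    ∀ (ms : List Int) (acc : Int) (song : List Int),
      ms.reverse.foldl (composeStepB notes sp) (acc + ms.foldl (· + ·) 0, song)
        = (acc, song ++ ((pvPsums acc ms).map
            (fun s => PySem.List.pyGetD notes (PySem.Int.mod (sp + s) (notes.length : Int)) 0)).reverse) := by
  intro ms
  induction ms with
  | nil => intro acc song; simp [pvPsums]
  | cons m ms ih =>
    intro acc song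
    rw [show (m :: ms).foldl (· + ·) 0 = m + ms.foldl (· + ·) 0 by simp only [List.foldl_cons, zero_add]; exact pvFoldl_add ms m]
    have hinit : acc + (m + ms.foldl (· + ·) 0) = (acc + m) + ms.foldl (· + ·) 0 := by ring
    rw [hinit]
    simp only [List.reverse_cons, List.foldl_append, ih (acc + m) song]
    simp [composeStepB, pvPsums]

-- ===== VERDICT (by name: the statement is the Claim_ definition above) =====
theorem compose_spec : Claim_equal_compose := by
  intro notes moves start_position _ _
  unfold Spec_compose compose compose_alt
  rw [pvCompose_key notes start_position moves start_position 0
      [PySem.List.pyGetD notes start_position 0] (by rw [add_zero])]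
  have h := pvComposeB_key notes start_position moves 0 []
  rw [zero_add] at h
  simp [h]
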